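-- pv_equiv track=rewrite | github.com/BUNTINTIN/GraduationProjectCode | knn.py | get_node_category
-- ===== SOURCE A (Python) =====
-- def get_node_category(list_dict_node_info):
--     dict_category_sum = {}
--     for dict_node_info in list_dict_node_info:
--         category = dict_node_info['category']
--         if category not in dict_category_sum:
--             dict_category_sum[category] = 0
--         dict_category_sum[category] += 1
--     list_dict_category_sum = sorted(dict_category_sum.items(),key=lambda x:x[1], reverse=True)
--     category = list_dict_category_sum[0][0]
--     return category
-- ===== SOURCE B (Python) =====
-- def get_node_category(list_dict_node_info):
--     # Same return value as the sort-based original, but the winner is found by a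
--     # single strict-argmax scan over the completed count dict instead of sorting it.
--     counts = {}
--     for dict_node_info in list_dict_node_info:
--         category = dict_node_info['category']
--         counts[category] = counts.get(category, 0) + 1
--     best_category = ''
--     best_count = 0
--     for category, n in counts.items():
--         if n > best_count:
--             best_category = category
--             best_count = n
--     return best_category
-- ===== Notes on version B (the rewrite author's own statement) =====
-- stated objective: simpler
-- what changed: The sort of the whole frequency table (then taking element [0]) is replaced by a single strict-greater argmax scan over the completed count dict in insertion order, which preserves the first-inserted tie-break; the counting update uses dict.get instead of a membership test plus two writes.
import Mathlib
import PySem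

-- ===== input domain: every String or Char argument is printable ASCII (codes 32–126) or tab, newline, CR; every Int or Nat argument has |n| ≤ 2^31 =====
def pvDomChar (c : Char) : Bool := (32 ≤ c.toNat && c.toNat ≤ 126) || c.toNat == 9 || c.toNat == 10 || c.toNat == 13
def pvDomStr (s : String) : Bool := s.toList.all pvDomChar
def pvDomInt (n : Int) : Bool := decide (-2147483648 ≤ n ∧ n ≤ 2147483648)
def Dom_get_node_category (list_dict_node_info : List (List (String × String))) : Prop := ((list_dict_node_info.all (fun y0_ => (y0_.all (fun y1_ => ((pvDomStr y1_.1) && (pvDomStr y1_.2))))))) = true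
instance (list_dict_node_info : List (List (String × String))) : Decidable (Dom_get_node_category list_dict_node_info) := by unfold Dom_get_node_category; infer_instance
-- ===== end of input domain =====

-- B replaces the sort-then-take-first selection by a single strict-greater argmax scan
-- over the completed count dict (same return value; no speed claim).


-- ===== PORT A =====
def get_node_category (list_dict_node_info : List (List (String × String))) : String :=
  let dict_category_sum : PySem.Dict String Int :=
    list_dict_node_info.foldl (fun d dict_node_info =>
      match List.lookup "category" dict_node_info with
      | none => d  -- Python raises KeyError here; excluded by Pre_
      | some category =>
        let d := if d.contains category then d else d.insert category 0
        d.insert category (d.getD category 0 + 1)) PySem.Dict.empty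
  let list_dict_category_sum :=
    PySem.List.sorted dict_category_sum.items (fun x => x.2) true
  match list_dict_category_sum with
  | [] => ""  -- list_dict_category_sum[0] raises IndexError here; excluded by Pre_
  | p :: _ => p.1

-- ===== PORT B =====
def get_node_category_alt (list_dict_node_info : List (List (String × String))) : String :=
  let counts : PySem.Dict String Int :=
    list_dict_node_info.foldl (fun d dict_node_info =>
      match List.lookup "category" dict_node_info with
      | none => d  -- Python raises KeyError here; excluded by Pre_
      | some category => d.insert category (d.getD category 0 + 1)) PySem.Dict.empty
  (counts.items.foldl
    (fun best p => if p.2 > best.2 then p else best) ("", 0)).1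

-- ===== PRECONDITION & SPEC =====
-- Pre_ excludes exactly the inputs on which Python A raises: the empty list (IndexError)
-- and lists containing a node dict without a 'category' key (KeyError).
def Pre_get_node_category (list_dict_node_info : List (List (String × String))) : Prop :=
  list_dict_node_info ≠ [] ∧
  ∀ node ∈ list_dict_node_info, "category" ∈ node.map Prod.fst
instance (list_dict_node_info : List (List (String × String))) : Decidable (Pre_get_node_category list_dict_node_info) := by unfold Pre_get_node_category; infer_instance

def pvWitness_get_node_category : (List (List (String × String))) :=
  [[("category", "a")], [("category", "b")], [("category", "a")]]

def Spec_get_node_category (list_dict_node_info : List (List (String × String))) (out : String) : Prop := out = get_node_category_alt list_dict_node_info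
instance (list_dict_node_info : List (List (String × String))) (out : String) : Decidable (Spec_get_node_category list_dict_node_info out) := by unfold Spec_get_node_category; infer_instance

-- ===== CLAIM (what is proved, stated in full; the proofs are below) =====
def Claim_equal_get_node_category : Prop := ∀ (list_dict_node_info : List (List (String × String))), Dom_get_node_category list_dict_node_info → Pre_get_node_category list_dict_node_info → Spec_get_node_category list_dict_node_info (get_node_category list_dict_node_info)

-- ===== LEMMAS AND PROOFS =====

-- The two counting folds build the same dict.
lemma count_fold_eq (l : List (List (String × String))) (d : PySem.Dict String Int) :
    l.foldl (fun d dict_node_info =>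
      match List.lookup "category" dict_node_info with
      | none => d
      | some category =>
        let d := if d.contains category then d else d.insert category 0
        d.insert category (d.getD category 0 + 1)) d
    = l.foldl (fun d dict_node_info =>
      match List.lookup "category" dict_node_info with
      | none => d
      | some category => d.insert category (d.getD category 0 + 1)) d := by
  induction l generalizing d with
  | nil => rfl
  | cons node t ih =>
    simp only [List.foldl_cons]
    cases h : List.lookup "category" node with
    | none => exact ih d
    | some c =>
      by_cases hc : d.contains c
      · simp only [hc, if_true]; exact ih _
      · have hcd : d.getD c 0 = 0 :=
          PySem.Dict.getD_of_not_contains d 0 (by simpa using hc)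
        simp only [hc, if_false, Bool.false_eq_true,
          PySem.Dict.getD_insert_self, PySem.Dict.insert_insert_self, hcd]
        exact ih _

-- The B counting fold is the counter of the extracted category list.
lemma count_fold_filterMap (l : List (List (String × String))) (d : PySem.Dict String Int) :
    l.foldl (fun d dict_node_info =>
      match List.lookup "category" dict_node_info with
      | none => d
      | some category => d.insert category (d.getD category 0 + 1)) d
    = (l.filterMap (fun node => List.lookup "category" node)).foldl
        (fun d c => d.insert c (d.getD c 0 + 1)) d := by
  induction l generalizing d with
  | nil => rfl
  | cons node t ih =>
    simp only [List.foldl_cons, List.filterMap_cons]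
    cases h : List.lookup "category" node with
    | none => exact ih d
    | some c => simp only [List.foldl_cons]; exact ih _

-- Head of the insertBy-fold (reverse sort) is the running strict-argmax over the keys.
lemma head_insertBy_fold (is : List (String × Int)) (a : String × Int) (acc : List (String × Int)) :
    ∃ t, is.foldl (fun acc x =>
        PySem.List.insertBy (fun p q => decide (((fun x : String × Int => x.2) q) < ((fun x : String × Int => x.2) p))) x acc) (a :: acc)
      = (is.foldl (fun b p => if b.2 < p.2 then p else b) a) :: t := by
  induction is generalizing a acc with
  | nil => exact ⟨acc, rfl⟩
  | cons x t ih =>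
    simp only [List.foldl_cons, PySem.List.insertBy]
    by_cases hx : a.2 < x.2
    · simp only [hx, decide_true, if_true]
      exact ih x (a :: acc)
    · simp only [hx, decide_false, Bool.false_eq_true, if_false]
      exact ih a _

-- Every count in the counter is positive for members.
lemma counter_snd_pos (cats : List String) (p : String × Int)
    (hp : p ∈ (PySem.Dict.counter cats).items) : 0 < p.2 := by
  rw [PySem.Dict.items_counter] at hp
  obtain ⟨k, hk, rfl⟩ := List.mem_map.mp hp
  have hkmem : k ∈ cats := (PySem.Set.mem_ofList cats k).mp hk
  have : 0 < cats.count k := List.count_pos_iff.mpr hkmem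
  dsimp only
  exact_mod_cast this

lemma lookup_isSome_of_mem_keys (node : List (String × String))
    (h : "category" ∈ node.map Prod.fst) : ∃ v, List.lookup "category" node = some v := by
  induction node with
  | nil => simp at h
  | cons p t ih =>
    simp only [List.map_cons, List.mem_cons] at h
    by_cases hp : ("category" : String) == p.1
    · exact ⟨p.2, by simp [List.lookup, hp]⟩
    · have : "category" ∈ t.map Prod.fst := by
        rcases h with h | h
        · exact absurd (beq_iff_eq.mpr h) hp
        · exact h
      obtain ⟨v, hv⟩ := ih this
      exact ⟨v, by simp [List.lookup, Bool.eq_false_iff.mpr hp, hv]⟩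

-- ===== VERDICT (by name: the statement is the Claim_ definition above) =====
theorem get_node_category_spec : Claim_equal_get_node_category := by
  intro l _ hpre
  obtain ⟨hne, hkeys⟩ := hpre
  unfold Spec_get_node_category get_node_category get_node_category_alt
  simp only [count_fold_eq, count_fold_filterMap]
  set cats := l.filterMap (fun node => List.lookup "category" node) with hcats
  have hdict : cats.foldl (fun d c => d.insert c (d.getD c 0 + 1)) PySem.Dict.empty
      = PySem.Dict.counter cats := PySem.Dict.foldl_insert_getD_add_one_eq_counter cats
  rw [hdict]
  -- cats is nonempty
  have hcne : cats ≠ [] := by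
    cases l with
    | nil => exact absurd rfl hne
    | cons node t =>
      obtain ⟨v, hv⟩ := lookup_isSome_of_mem_keys node (hkeys node (by simp))
      simp [hcats, hv]
  -- hence the items list is nonempty
  have hitems : (PySem.Dict.counter cats).items ≠ [] := by
    rw [PySem.Dict.items_counter]
    cases hc : cats with
    | nil => exact absurd hc hcne
    | cons c t =>
      intro habs
      have : c ∈ PySem.Set.ofList (c :: t) :=
        (PySem.Set.mem_ofList (c :: t) c).mpr (by simp)
      rw [List.map_eq_nil_iff.mp habs] at this
      simp at this
  obtain ⟨q, is, hq⟩ := List.exists_cons_of_ne_nil hitems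
  rw [hq]
  -- A side: head of the reverse sort
  rw [PySem.List.sorted_rev_eq_foldl_insertBy]
  simp only [List.foldl_cons, PySem.List.insertBy]
  obtain ⟨t, ht⟩ := head_insertBy_fold is q []
  rw [ht]
  -- B side: the argmax fold starting from ("", 0) immediately adopts q

  have hqpos : (0 : Int) < q.2 := counter_snd_pos cats q (hq ▸ List.mem_cons_self)
  have h0 : ((("", 0) : String × Int).2 < q.2) := hqpos
  simp only [gt_iff_lt, h0, if_true]
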